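-- pv_equiv track=rewrite | github.com/liupengsay/PyIsTheBestLang | src/string/lyndon_decomposition/template.py | min_express
-- ===== SOURCE A (Python) =====
-- def min_express(sec):
--     """template of minimum lexicographic expression"""
--     n = len(sec)  # min_suffix
--     k, i, j = 0, 0, 1
--     while k < n and i < n and j < n:
--         if sec[(i + k) % n] == sec[(j + k) % n]:
--             k += 1
--         else:
--             if sec[(i + k) % n] > sec[(j + k) % n]:
--                 i = i + k + 1
--             else:
--                 j = j + k + 1
--             if i == j:
--                 i += 1
--             k = 0
--     i = i if i < j else j
--     return i, sec[i:] + sec[:i]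
-- ===== SOURCE B (Python) =====
-- def min_express(sec):
--     """template of minimum lexicographic expression"""
--     n = len(sec)
--     best_i, best_r = 0, sec
--     for i in range(1, n):
--         r = sec[i:] + sec[:i]
--         if r < best_r:
--             best_i, best_r = i, r
--     return best_i, best_r
-- ===== Notes on version B (the rewrite author's own statement) =====
-- stated objective: simpler
-- what changed: Replaces the two-pointer minimum-expression scan with a direct brute-force enumeration of all n rotations, keeping the lexicographically smallest one (strict '<' keeps the first index on ties).
import Mathlib
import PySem

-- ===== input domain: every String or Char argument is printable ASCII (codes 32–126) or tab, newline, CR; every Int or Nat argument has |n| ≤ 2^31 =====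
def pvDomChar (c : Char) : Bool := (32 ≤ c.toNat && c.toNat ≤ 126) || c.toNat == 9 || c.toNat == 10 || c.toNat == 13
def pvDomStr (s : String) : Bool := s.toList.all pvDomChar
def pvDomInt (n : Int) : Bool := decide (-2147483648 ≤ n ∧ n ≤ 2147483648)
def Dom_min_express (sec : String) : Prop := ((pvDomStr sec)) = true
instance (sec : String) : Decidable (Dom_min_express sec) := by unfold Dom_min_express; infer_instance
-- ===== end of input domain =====

-- B replaces A's two-pointer minimum-expression scan by brute-force enumeration of all
-- rotations, keeping the lexicographically smallest (simpler; not faster: O(n^2) vs O(n)).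

-- ===== PORT A =====
-- A's while loop: state (k, i, j); returns the final `i if i < j else j`.
-- `fuel` only makes the recursion structural: the loop's measure k+i+j rises by at
-- least 1 per iteration and is < 3*n while it runs, so fuel 3*n+1 is never exhausted.
def minExpressLoop (l : List Char) (n fuel k i j : Nat) : Nat :=
  match fuel with
  | 0 => if i < j then i else j
  | fuel + 1 =>
    if k < n ∧ i < n ∧ j < n then
      if l.getD ((i + k) % n) 'a' = l.getD ((j + k) % n) 'a' then
        minExpressLoop l n fuel (k + 1) i j
      else
        if l.getD ((j + k) % n) 'a' < l.getD ((i + k) % n) 'a' then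
          -- i = i + k + 1; if i == j: i += 1; k = 0
          if i + k + 1 = j then minExpressLoop l n fuel 0 (i + k + 2) j
          else minExpressLoop l n fuel 0 (i + k + 1) j
        else
          -- j = j + k + 1; if i == j: i += 1; k = 0
          if i = j + k + 1 then minExpressLoop l n fuel 0 (i + 1) (j + k + 1)
          else minExpressLoop l n fuel 0 i (j + k + 1)
    else
      if i < j then i else j

def min_express (sec : String) : Int × String :=
  let l := sec.toList
  let n := l.length
  let i := minExpressLoop l n (3 * n + 1) 0 0 1
  ((i : Int), String.ofList (l.drop i ++ l.take i))

-- ===== PORT B =====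
def min_express_alt (sec : String) : Int × String :=
  let l := sec.toList
  let n := l.length
  let st := (List.range' 1 (n - 1)).foldl
    (fun (st : Nat × List Char) p =>
      if l.drop p ++ l.take p < st.2 then (p, l.drop p ++ l.take p) else st) (0, l)
  ((st.1 : Int), String.ofList st.2)

-- ===== PRECONDITION & SPEC =====
def Spec_min_express (sec : String) (out : Int × String) : Prop := out = min_express_alt sec
instance (sec : String) (out : Int × String) : Decidable (Spec_min_express sec out) := by unfold Spec_min_express; infer_instance

-- ===== CLAIM (what is proved, stated in full; the proofs are below) =====
def Claim_equal_min_express : Prop := ∀ (sec : String), Dom_min_express sec → Spec_min_express sec (min_express sec)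

-- ===== LEMMAS AND PROOFS =====

-- rotation of l by p, and the character of l at x modulo the length
def rotc (l : List Char) (p : Nat) : List Char := l.drop p ++ l.take p
def chr (l : List Char) (x : Nat) : Char := l.getD (x % l.length) 'a'

-- m is the first index (among 0..n-1) whose rotation is lexicographically minimal
def IsBest (l : List Char) (m : Nat) : Prop :=
  m < l.length ∧ ∀ p, p < l.length →
    rotc l m < rotc l p ∨ (rotc l m = rotc l p ∧ m ≤ p)

theorem length_rotc (l : List Char) (p : Nat) : (rotc l p).length = l.length := by
  simp [rotc]; omega

theorem rotc_getElem? (l : List Char) (p q : Nat) (hp : p < l.length) (hq : q < l.length) :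
    (rotc l p)[q]? = some (chr l (p + q)) := by
  have hn : 0 < l.length := by omega
  unfold rotc chr
  rw [List.getD_eq_getElem?_getD]
  by_cases hc : q < l.length - p
  · rw [List.getElem?_append_left (by simp; omega)]
    rw [List.getElem?_drop]
    have h1 : (p + q) % l.length = p + q := Nat.mod_eq_of_lt (by omega)
    rw [h1, List.getElem?_eq_getElem (by omega)]
    simp
  · rw [List.getElem?_append_right (by simp; omega)]
    simp only [List.length_drop]
    rw [List.getElem?_take]
    rw [if_pos (by omega)]
    have h2 : (p + q) % l.length = p + q - l.length := by
      rw [Nat.mod_eq_sub_mod (by omega)]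
      exact Nat.mod_eq_of_lt (by omega)
    have h1 : (p + q) % l.length = q - (l.length - p) := by omega
    rw [h1, List.getElem?_eq_getElem (by omega)]
    simp

theorem rotc_getElem (l : List Char) (p q : Nat) (hp : p < l.length) (hq : q < l.length) :
    (rotc l p)[q]'(by rw [length_rotc]; exact hq) = chr l (p + q) := by
  have h := rotc_getElem? l p q hp hq
  rw [List.getElem?_eq_getElem (by rw [length_rotc]; exact hq)] at h
  exact Option.some.inj h

theorem chr_add_mod (l : List Char) (x q : Nat) :
    chr l (x % l.length + q) = chr l (x + q) := by
  unfold chr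
  rw [Nat.mod_add_mod]

theorem chr_mod_add (l : List Char) (i x : Nat) :
    chr l (i + x % l.length) = chr l (i + x) := by
  unfold chr
  rw [Nat.add_mod_mod]

-- lexicographic strict comparison from first difference
theorem lex_lt_of_eq_upto (u v : List Char) (d : Nat) (hdu : d < u.length) (hdv : d < v.length)
    (ha : ∀ q, (h : q < d) → u[q]'(by omega) = v[q]'(by omega))
    (hlt : u[d] < v[d]) : u < v := by
  induction d generalizing u v with
  | zero =>
    cases u with
    | nil => simp at hdu
    | cons a u' =>
      cases v with
      | nil => simp at hdv
      | cons b v' =>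
        exact List.Lex.rel hlt
  | succ d ih =>
    cases u with
    | nil => simp at hdu
    | cons a u' =>
      cases v with
      | nil => simp at hdv
      | cons b v' =>
        have h0 : a = b := ha 0 (by omega)
        subst h0
        apply List.Lex.cons
        apply ih u' v' (by simp at hdu; omega) (by simp at hdv; omega)
        · intro q hq
          have := ha (q + 1) (by omega)
          simpa using this
        · simpa using hlt

theorem eq_of_rotc_pointwise (l : List Char) (a b : Nat) (ha : a < l.length) (hb : b < l.length)
    (h : ∀ q, q < l.length → chr l (a + q) = chr l (b + q)) : rotc l a = rotc l b := by
  apply List.ext_getElem (by rw [length_rotc, length_rotc])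
  intro q h1 h2
  rw [length_rotc] at h1
  rw [rotc_getElem l a q ha h1, rotc_getElem l b q hb h1]
  exact h q h1

-- when sec[(j+k)%n] < sec[(i+k)%n] after k matching characters, every rotation
-- starting at (i+t)%n, t ≤ k, is strictly beaten by the one starting at (j+t)%n
theorem discard (l : List Char) (i j k : Nat)
    (hi : i < l.length) (hj : j < l.length) (hk : k < l.length)
    (heq : ∀ t, t < k → chr l (i + t) = chr l (j + t))
    (hgt : chr l (j + k) < chr l (i + k)) :
    ∀ t, t ≤ k → rotc l ((j + t) % l.length) < rotc l ((i + t) % l.length) := by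
  intro t ht
  have hn : 0 < l.length := by omega
  have hjt : (j + t) % l.length < l.length := Nat.mod_lt _ hn
  have hit : (i + t) % l.length < l.length := Nat.mod_lt _ hn
  apply lex_lt_of_eq_upto _ _ (k - t) (by rw [length_rotc]; omega) (by rw [length_rotc]; omega)
  · intro q hq
    rw [rotc_getElem l _ q hjt (by omega), rotc_getElem l _ q hit (by omega)]
    rw [chr_add_mod, chr_add_mod]
    have h1 : j + t + q = j + (t + q) := by omega
    have h2 : i + t + q = i + (t + q) := by omega
    rw [h1, h2]
    exact (heq (t + q) (by omega)).symm
  · rw [rotc_getElem l _ (k - t) hjt (by omega), rotc_getElem l _ (k - t) hit (by omega)]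
    rw [chr_add_mod, chr_add_mod]
    have h1 : j + t + (k - t) = j + k := by omega
    have h2 : i + t + (k - t) = i + k := by omega
    rw [h1, h2]
    exact hgt

theorem best_ne_discarded (l : List Char) (m a b : Nat) (hm : IsBest l m)
    (hb : b < l.length) (h : rotc l b < rotc l a) : m ≠ a := by
  rintro rfl
  rcases hm.2 b hb with h1 | ⟨h1, _⟩
  · exact absurd (lt_trans h1 h) (lt_irrefl _)
  · rw [h1] at h
    exact absurd h (lt_irrefl _)

-- the loop invariant relative to the best index m
def LoopInv (l : List Char) (k i j m : Nat) : Prop :=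
  i ≠ j ∧ (∀ t, t < k → chr l (i + t) = chr l (j + t)) ∧
  (m = i ∨ m = j ∨ max i j < m)

-- the string is periodic under the shift b - a: no best index can lie beyond b
theorem no_far_best (l : List Char) (a b m : Nat) (hab : a < b) (hbn : b < l.length)
    (hx : ∀ x, chr l (a + x) = chr l (b + x)) (hm : IsBest l m) (hbm : b < m) : False := by
  have hm1 := hm.1
  have hrot : rotc l (m - (b - a)) = rotc l m := by
    apply eq_of_rotc_pointwise l (m - (b - a)) m (by omega) hm1
    intro q hq
    have h1 : m - (b - a) + q = a + (m - b + q) := by omega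
    have h2 : m + q = b + (m - b + q) := by omega
    rw [h1, h2]
    exact hx (m - b + q)
  rcases hm.2 (m - (b - a)) (by omega) with h | ⟨h, hle⟩
  · rw [hrot] at h
    exact absurd h (lt_irrefl _)
  · omega

theorem chr_shift (l : List Char) (i j : Nat) (hn : 0 < l.length)
    (heq : ∀ t, t < l.length → chr l (i + t) = chr l (j + t)) :
    ∀ x, chr l (i + x) = chr l (j + x) := by
  intro x
  rw [← chr_mod_add l i x, ← chr_mod_add l j x]
  exact heq (x % l.length) (Nat.mod_lt x hn)

theorem exit_correct (l : List Char) (k i j m : Nat)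
    (hguard : ¬(k < l.length ∧ i < l.length ∧ j < l.length))
    (hInv : LoopInv l k i j m) (hm : IsBest l m) :
    (if i < j then i else j) = m := by
  obtain ⟨hij, heq, hmem⟩ := hInv
  have hm1 := hm.1
  have hn : 0 < l.length := by omega
  by_cases hi : i < l.length
  · by_cases hj : j < l.length
    · -- k ≥ n : full-period match, rotc i = rotc j
      have hk : l.length ≤ k := by omega
      have heqn : ∀ t, t < l.length → chr l (i + t) = chr l (j + t) :=
        fun t ht => heq t (by omega)
      have hrot : rotc l i = rotc l j :=
        eq_of_rotc_pointwise l i j hi hj heqn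
      have hmij : m = i ∨ m = j := by
        rcases hmem with h | h | h
        · exact Or.inl h
        · exact Or.inr h
        · exfalso
          rcases Nat.lt_or_ge i j with hlt | hge
          · exact no_far_best l i j m hlt hj (chr_shift l i j hn heqn) hm (by omega)
          · have hji : j < i := by omega
            exact no_far_best l j i m hji hi
              (chr_shift l j i hn (fun t ht => (heqn t ht).symm)) hm (by omega)
      by_cases hlt : i < j
      · rw [if_pos hlt]
        rcases hmij with h | h
        · omega
        · -- m = j with i < j : impossible, rot i = rot j forces m ≤ i
          exfalso
          rcases hm.2 i hi with h1 | ⟨h1, h2⟩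
          · rw [h, ← hrot] at h1
            exact absurd h1 (lt_irrefl _)
          · omega
      · rw [if_neg hlt]
        rcases hmij with h | h
        · exfalso
          rcases hm.2 j hj with h1 | ⟨h1, h2⟩
          · rw [h, hrot] at h1
            exact absurd h1 (lt_irrefl _)
          · omega
        · omega
    · -- j ≥ n : best must be i
      have : m = i := by rcases hmem with h | h | h <;> omega
      rw [if_pos (by omega)]
      omega
  · -- i ≥ n : best must be j
    have : m = j := by rcases hmem with h | h | h <;> omega
    rw [if_neg (by omega)]
    omega

theorem loop_best (l : List Char) (n : Nat) (hn : n = l.length) :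
    ∀ fuel k i j m, 3 * n - (k + i + j) ≤ fuel → LoopInv l k i j m → IsBest l m →
      minExpressLoop l n fuel k i j = m := by
  subst hn
  intro fuel
  induction fuel with
  | zero =>
    intro k i j m hM hInv hm
    simp only [minExpressLoop]
    exact exit_correct l k i j m (by omega) hInv hm
  | succ M ih =>
    intro k i j m hM hInv hm
    simp only [minExpressLoop]
    by_cases hg : k < l.length ∧ i < l.length ∧ j < l.length
    · rw [if_pos hg]
      obtain ⟨hk, hi, hj⟩ := hg
      obtain ⟨hij, heq, hmem⟩ := hInv
      have hm1 := hm.1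
      by_cases he : l.getD ((i + k) % l.length) 'a' = l.getD ((j + k) % l.length) 'a'
      · rw [if_pos he]
        apply ih (k + 1) i j m (by omega) _ hm
        refine ⟨hij, ?_, hmem⟩
        intro t ht
        rcases Nat.lt_or_ge t k with h | h
        · exact heq t h
        · have : t = k := by omega
          subst this
          simpa [chr] using he
      · rw [if_neg he]
        by_cases hgt : l.getD ((j + k) % l.length) 'a' < l.getD ((i + k) % l.length) 'a'
        · rw [if_pos hgt]
          -- discard rotations (i+t)%n, t ≤ k
          have hdisc := discard l i j k hi hj hk heq (by simpa [chr] using hgt)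
          have hne : ∀ t, t ≤ k → m ≠ (i + t) % l.length := fun t ht =>
            best_ne_discarded l m _ _ hm (Nat.mod_lt _ (by omega)) (hdisc t ht)
          have hnei : m ≠ i := by
            have := hne 0 (by omega)
            rwa [Nat.add_zero, Nat.mod_eq_of_lt hi] at this
          by_cases hb : i + k + 1 = j
          · rw [if_pos hb]
            apply ih 0 (i + k + 2) j m (by omega) _ hm
            refine ⟨by omega, by omega, ?_⟩
            rcases hmem with h | h | h
            · omega
            · omega
            · omega
          · rw [if_neg hb]
            apply ih 0 (i + k + 1) j m (by omega) _ hm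
            refine ⟨hb, by omega, ?_⟩
            rcases hmem with h | h | h
            · omega
            · omega
            · -- max i j < m : either beyond max (i+k+1) j, or equal to i+k+1
              by_cases hfar : max (i + k + 1) j < m
              · omega
              · -- m ≤ max (i+k+1) j; j ≤ max i j < m forces i+k+1 > j and i < m ≤ i+k+1
                have hij2 : j < i + k + 1 := by omega
                have hrange : i < m ∧ m ≤ i + k + 1 := by omega
                by_cases hend : m = i + k + 1
                · omega
                · exfalso
                  have ht : m - i ≤ k := by omega
                  have := hne (m - i) ht
                  rw [show i + (m - i) = m by omega, Nat.mod_eq_of_lt hm1] at this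
                  exact this rfl
        · rw [if_neg hgt]
          -- the i-side character is smaller: discard rotations (j+t)%n, t ≤ k
          have hlt' : chr l (i + k) < chr l (j + k) := by
            rcases lt_trichotomy (chr l (i + k)) (chr l (j + k)) with h | h | h
            · exact h
            · exact absurd (by simpa [chr] using h) he
            · exact absurd (by simpa [chr] using h) hgt
          have hdisc := discard l j i k hj hi hk (fun t ht => (heq t ht).symm) hlt'
          have hne : ∀ t, t ≤ k → m ≠ (j + t) % l.length := fun t ht =>
            best_ne_discarded l m _ _ hm (Nat.mod_lt _ (by omega)) (hdisc t ht)
          have hnej : m ≠ j := by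
            have := hne 0 (by omega)
            rwa [Nat.add_zero, Nat.mod_eq_of_lt hj] at this
          by_cases hb : i = j + k + 1
          · rw [if_pos hb]
            apply ih 0 (i + 1) (j + k + 1) m (by omega) _ hm
            refine ⟨by omega, by omega, ?_⟩
            rcases hmem with h | h | h
            · omega
            · omega
            · omega
          · rw [if_neg hb]
            apply ih 0 i (j + k + 1) m (by omega) _ hm
            refine ⟨hb, by omega, ?_⟩
            rcases hmem with h | h | h
            · omega
            · omega
            · by_cases hfar : max i (j + k + 1) < m
              · omega
              · have hij2 : i < j + k + 1 := by omega
                have hrange : j < m ∧ m ≤ j + k + 1 := by omega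
                by_cases hend : m = j + k + 1
                · omega
                · exfalso
                  have ht : m - j ≤ k := by omega
                  have := hne (m - j) ht
                  rw [show j + (m - j) = m by omega, Nat.mod_eq_of_lt hm1] at this
                  exact this rfl
    · rw [if_neg hg]
      exact exit_correct l k i j m hg hInv hm

-- B's fold: the state is (index, its rotation) and the index is the first minimum so far
theorem fold_spec (l : List Char) :
    ∀ (c i b : Nat) (st : Nat × List Char), b < i →
    st = (List.range' i c).foldl
      (fun (st : Nat × List Char) p =>
        if l.drop p ++ l.take p < st.2 then (p, l.drop p ++ l.take p) else st) (b, rotc l b) →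
    st.2 = rotc l st.1 ∧ (st.1 = b ∨ (i ≤ st.1 ∧ st.1 < i + c)) ∧
    rotc l st.1 ≤ rotc l b ∧ (rotc l st.1 = rotc l b → st.1 = b) ∧
    ∀ p, i ≤ p → p < i + c →
      rotc l st.1 < rotc l p ∨ (rotc l st.1 = rotc l p ∧ st.1 ≤ p) := by
  intro c
  induction c with
  | zero =>
    intro i b st hb hst
    simp only [List.range'] at hst
    simp only [List.foldl_nil] at hst
    subst hst
    refine ⟨rfl, Or.inl rfl, le_rfl, fun _ => rfl, ?_⟩
    intro p hp1 hp2
    omega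
  | succ c ih =>
    intro i b st hb hst
    rw [List.range'_succ, List.foldl_cons] at hst
    have hstep : (if l.drop i ++ l.take i < (b, rotc l b).2 then (i, l.drop i ++ l.take i)
        else (b, rotc l b)) = if rotc l i < rotc l b then (i, rotc l i) else (b, rotc l b) := by
      rfl
    rw [hstep] at hst
    by_cases hc : rotc l i < rotc l b
    · rw [if_pos hc] at hst
      obtain ⟨H1, H2, H3, H4, H5⟩ := ih (i + 1) i st (by omega) hst
      refine ⟨H1, by omega, le_trans H3 (le_of_lt hc), ?_, ?_⟩
      · intro h
        exfalso
        have := lt_of_le_of_lt H3 hc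
        rw [h] at this
        exact absurd this (lt_irrefl _)
      · intro p hp1 hp2
        by_cases hpi : p = i
        · subst hpi
          rcases eq_or_lt_of_le H3 with heq | hlt
          · exact Or.inr ⟨heq, by rw [H4 heq]⟩
          · exact Or.inl hlt
        · exact H5 p (by omega) (by omega)
    · rw [if_neg hc] at hst
      obtain ⟨H1, H2, H3, H4, H5⟩ := ih (i + 1) b st (by omega) hst
      refine ⟨H1, by omega, H3, H4, ?_⟩
      intro p hp1 hp2
      by_cases hpi : p = i
      · subst hpi
        have hbi : rotc l b ≤ rotc l p := not_lt.mp hc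
        rcases eq_or_lt_of_le (le_trans H3 hbi) with heq | hlt
        · have hbb : rotc l st.1 = rotc l b := le_antisymm H3 (by rw [heq]; exact hbi)
          exact Or.inr ⟨heq, by rw [H4 hbb]; omega⟩
        · exact Or.inl hlt
      · exact H5 p (by omega) (by omega)

theorem rotc_zero (l : List Char) : rotc l 0 = l := by simp [rotc]

-- ===== VERDICT (by name: the statement is the Claim_ definition above) =====
theorem min_express_spec : Claim_equal_min_express := by
  unfold Claim_equal_min_express Spec_min_express
  intro sec _
  simp only [min_express, min_express_alt]
  by_cases hn0 : sec.toList.length = 0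
  · have hnil : sec.toList = [] := List.eq_nil_of_length_eq_zero hn0
    rw [hnil]
    simp [minExpressLoop]
  · have hn : 0 < sec.toList.length := by omega
    obtain ⟨H1, H2, H3, H4, H5⟩ := fold_spec sec.toList (sec.toList.length - 1) 1 0
      ((List.range' 1 (sec.toList.length - 1)).foldl
        (fun (st : Nat × List Char) p =>
          if sec.toList.drop p ++ sec.toList.take p < st.2 then (p, sec.toList.drop p ++ sec.toList.take p) else st)
        (0, sec.toList)) (by omega) (by rw [rotc_zero])
    set st := (List.range' 1 (sec.toList.length - 1)).foldl
      (fun (st : Nat × List Char) p =>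
        if sec.toList.drop p ++ sec.toList.take p < st.2 then (p, sec.toList.drop p ++ sec.toList.take p) else st)
      (0, sec.toList) with hst
    have hbest : IsBest sec.toList st.1 := by
      constructor
      · omega
      · intro p hp
        rcases Nat.eq_zero_or_pos p with rfl | hp0
        · rcases eq_or_lt_of_le H3 with heq | hlt
          · exact Or.inr ⟨heq, by rw [H4 heq]⟩
          · exact Or.inl hlt
        · exact H5 p hp0 (by omega)
    have hloop := loop_best sec.toList sec.toList.length rfl (3 * sec.toList.length + 1) 0 0 1 st.1 (by omega)
      ⟨by omega, fun t ht => absurd ht (by omega), by omega⟩ hbest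
    rw [hloop, H1]
    rfl
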